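-- pv_equiv track=rewrite | github.com/tlijkkkk/mark_v | leetcode-practice/leetcode_practice/meta_puzzle/level_2/rotary_lock2.py | get_min_code_entry_time_ii
-- ===== SOURCE A (Python) =====
-- from typing import List
--
-- def get_min_code_entry_time_ii(N: int, M: int, C: List[int]) -> int:
--     state_time = {(1,1): 0}
--
--     for code in C:
--         new_state_time = {}
--         for left, right in state_time:
--             # left
--             time_left = state_time[(left, right)] + min(abs(code - left), N - abs(code - left))
--             new_state_time[(code, right)] = min(new_state_time.get((code, right), float('inf')), time_left)
--
--             # right
--             time_right = state_time[(left, right)] + min(abs(code - right), N - abs(code - right))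
--             new_state_time[(left, code)] = min(new_state_time.get((left, code), float('inf')), time_right)
--         state_time = new_state_time
--
--     return min(state_time.values())
-- ===== SOURCE B (Python) =====
-- from typing import List
--
-- def get_min_code_entry_time_ii(N: int, M: int, C: List[int]) -> int:
--     # 1D DP: active finger is implicitly at the last entered code; dp[j] is the
--     # best cost with the free finger at pos[j], where pos = [1] + codes entered before last.
--     if not C:
--         return 0
--
--     def dist(a, b):
--         d = abs(a - b)
--         return min(d, N - d)
--
--     pos = [1]
--     dp = [dist(1, C[0])]
--     prev = C[0]
--     for code in C[1:]:
--         best = min(d + dist(p, code) for p, d in zip(pos, dp))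
--         dp = [d + dist(prev, code) for d in dp] + [best]
--         pos = pos + [prev]
--         prev = code
--     return min(dp)
-- ===== Notes on version B (the rewrite author's own statement) =====
-- stated objective: faster
-- what changed: Replaces the dict keyed by (left,right) finger pairs with a 1D DP list indexed by the free finger's position (positions [1]+C[:-1]), the active finger being implicitly at the last entered code; each step is an element-wise list shift plus one min-reduction instead of rebuilding a dict of pair states.
import Mathlib
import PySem

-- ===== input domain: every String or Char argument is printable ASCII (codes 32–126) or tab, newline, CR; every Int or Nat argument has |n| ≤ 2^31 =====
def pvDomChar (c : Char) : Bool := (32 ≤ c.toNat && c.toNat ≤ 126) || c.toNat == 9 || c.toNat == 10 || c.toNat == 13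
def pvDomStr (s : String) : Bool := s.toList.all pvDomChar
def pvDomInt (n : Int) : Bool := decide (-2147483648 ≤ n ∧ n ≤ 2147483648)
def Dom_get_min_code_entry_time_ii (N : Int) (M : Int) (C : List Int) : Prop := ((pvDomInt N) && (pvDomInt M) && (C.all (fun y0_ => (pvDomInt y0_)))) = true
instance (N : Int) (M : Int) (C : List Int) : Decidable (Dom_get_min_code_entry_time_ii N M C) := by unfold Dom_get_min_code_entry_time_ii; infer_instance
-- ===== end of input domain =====

-- B replaces A's dict keyed by (left,right) finger pairs with a 1D DP list indexed by the
-- free finger's position, the other finger being implicitly at the last entered code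
-- (objective: alternative algorithm/data structure, same return value).

-- ===== PORT A =====
-- one iteration of A's outer loop: rebuild the dict of (left,right) states for the next code
def stepA (N : Int) (st : PySem.Dict (Int × Int) Int) (code : Int) : PySem.Dict (Int × Int) Int :=
  st.items.foldl (fun nst it =>
    let l := it.1.1
    let r := it.1.2
    let v := it.2
    let tl := v + min |code - l| (N - |code - l|)
    let nst1 := nst.insert (code, r) (match nst.get? (code, r) with
      | none => tl
      | some w => min w tl)
    let tr := v + min |code - r| (N - |code - r|)
    nst1.insert (l, code) (match nst1.get? (l, code) with
      | none => tr
      | some w => min w tr)) PySem.Dict.empty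

def get_min_code_entry_time_ii (N : Int) (M : Int) (C : List Int) : Int :=
  let final := C.foldl (stepA N) ((PySem.Dict.empty).insert (1, 1) 0)
  (PySem.List.min? final.values (fun x => x)).getD 0

-- ===== PORT B =====
def distB (N a b : Int) : Int := min |a - b| (N - |a - b|)

-- one iteration of B's loop over C[1:]: state is (pos, dp, prev)
def stepB (N : Int) (s : List Int × List Int × Int) (code : Int) : List Int × List Int × Int :=
  let pos := s.1
  let dp := s.2.1
  let prev := s.2.2
  let best := (PySem.List.min? ((pos.zip dp).map (fun pd => pd.2 + distB N pd.1 code)) (fun x => x)).getD 0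
  (pos ++ [prev], dp.map (fun d => d + distB N prev code) ++ [best], code)

def get_min_code_entry_time_ii_alt (N : Int) (M : Int) (C : List Int) : Int :=
  match C with
  | [] => 0
  | c0 :: rest =>
    let s := rest.foldl (stepB N) ([1], [distB N 1 c0], c0)
    (PySem.List.min? s.2.1 (fun x => x)).getD 0

-- ===== PRECONDITION & SPEC =====
def Spec_get_min_code_entry_time_ii (N : Int) (M : Int) (C : List Int) (out : Int) : Prop := out = get_min_code_entry_time_ii_alt N M C
instance (N : Int) (M : Int) (C : List Int) (out : Int) : Decidable (Spec_get_min_code_entry_time_ii N M C out) := by unfold Spec_get_min_code_entry_time_ii; infer_instance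

-- ===== CLAIM (what is proved, stated in full; the proofs are below) =====
def Claim_equal_get_min_code_entry_time_ii : Prop := ∀ (N : Int) (M : Int) (C : List Int), Dom_get_min_code_entry_time_ii N M C → Spec_get_min_code_entry_time_ii N M C (get_min_code_entry_time_ii N M C)

-- ===== LEMMAS AND PROOFS =====

-- option-valued minimum (none = no candidate yet)
def omin : Option Int → Option Int → Option Int
  | none, b => b
  | some x, none => some x
  | some x, some y => some (min x y)

lemma omin_none_right (a : Option Int) : omin a none = a := by cases a <;> rfl

lemma omin_assoc (a b c : Option Int) : omin (omin a b) c = omin a (omin b c) := by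
  cases a <;> cases b <;> cases c <;> simp [omin, min_assoc]

-- Python's  d[k] = min(d.get(k, inf), v)
def minsert (d : PySem.Dict (Int × Int) Int) (kv : (Int × Int) × Int) : PySem.Dict (Int × Int) Int :=
  d.insert kv.1 (match d.get? kv.1 with
    | none => kv.2
    | some w => min w kv.2)

-- minimum of the values attached to key q in an association list (duplicates allowed)
def mfilG {κ : Type} [BEq κ] (P : List (κ × Int)) (q : κ) : Option Int :=
  PySem.List.min? ((P.filter (fun kv => kv.1 == q)).map Prod.snd) (fun x => x)

-- the value B's inner min-reduction produces
def bestOf (N : Int) (pos dp : List Int) (code : Int) : Int :=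
  (PySem.List.min? ((pos.zip dp).map (fun pd => pd.2 + distB N pd.1 code)) (fun x => x)).getD 0

-- the two dict writes A performs for one old state, as (key, value) contributions
def pairsOf (N c : Int) (it : (Int × Int) × Int) : List ((Int × Int) × Int) :=
  [((c, it.1.2), it.2 + distB N c it.1.1), ((it.1.1, c), it.2 + distB N c it.1.2)]

-- the loop invariant tying A's dict to B's (pos, dp, prev) state
def InvAB (st : PySem.Dict (Int × Int) Int) (pos dp : List Int) (prev : Int) : Prop :=
  pos.length = dp.length ∧ pos ≠ [] ∧ st.keys.Nodup ∧
  ∀ a b : Int, st.get? (a, b) =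
    (if a = prev then mfilG (pos.zip dp) b
     else if b = prev then mfilG (pos.zip dp) a else none)

lemma distB_comm (N a b : Int) : distB N a b = distB N b a := by
  simp [distB, abs_sub_comm]

lemma min?_id_cons' (v : Int) (t : List Int) :
    PySem.List.min? (v :: t) (fun x => x) = omin (some v) (PySem.List.min? t (fun x => x)) := by
  rw [PySem.List.min?_id_cons]
  cases t with
  | nil => rfl
  | cons y t' =>
      rw [PySem.List.min?_id_cons]
      show some (List.foldl min (min v y) t') = some (min v (List.foldl min y t'))
      rw [List.foldl_assoc]

lemma mfilG_nil {κ : Type} [BEq κ] (q : κ) : mfilG ([] : List (κ × Int)) q = none := rfl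

lemma mfilG_cons {κ : Type} [BEq κ] (kv : κ × Int) (t : List (κ × Int)) (q : κ) :
    mfilG (kv :: t) q = omin (if kv.1 == q then some kv.2 else none) (mfilG t q) := by
  unfold mfilG
  by_cases h : kv.1 == q
  · simp only [List.filter_cons, h, if_true, List.map_cons, min?_id_cons']
  · simp only [List.filter_cons, h]
    simp [omin]

lemma get?_minsert (d : PySem.Dict (Int × Int) Int) (kv : (Int × Int) × Int) (q : Int × Int) :
    (minsert d kv).get? q = if q = kv.1 then omin (d.get? kv.1) (some kv.2) else d.get? q := by
  unfold minsert
  rw [PySem.Dict.get?_insert]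
  cases h : d.get? kv.1 <;> simp [omin]

lemma get?_foldl_minsert (P : List ((Int × Int) × Int)) :
    ∀ (d : PySem.Dict (Int × Int) Int) (q : Int × Int),
      (P.foldl minsert d).get? q = omin (d.get? q) (mfilG P q) := by
  induction P with
  | nil =>
      intro d q
      show d.get? q = omin (d.get? q) none
      rw [omin_none_right]
  | cons kv t ih =>
      intro d q
      rw [List.foldl_cons, ih, get?_minsert, mfilG_cons, ← omin_assoc]
      by_cases h : q = kv.1
      · simp [h]
      · have hb : (kv.1 == q) = false := by simp [Ne.symm h]
        simp [h, hb, omin_none_right]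

lemma nodup_keys_foldl_minsert (P : List ((Int × Int) × Int)) (d : PySem.Dict (Int × Int) Int)
    (h : d.keys.Nodup) : (P.foldl minsert d).keys.Nodup := by
  exact PySem.Dict.nodup_keys_foldl_insert_key P Prod.fst _ d h

lemma foldl_bodyA (N c : Int) (L : List ((Int × Int) × Int)) :
    ∀ e, L.foldl (fun nst it =>
        minsert (minsert nst ((c, it.1.2), it.2 + distB N c it.1.1))
          ((it.1.1, c), it.2 + distB N c it.1.2)) e
      = (L.flatMap (pairsOf N c)).foldl minsert e := by
  induction L with
  | nil => intro e; rfl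
  | cons it t ih =>
      intro e
      rw [List.foldl_cons, ih, List.flatMap_cons]
      rfl

lemma stepA_eq (N c : Int) (st : PySem.Dict (Int × Int) Int) :
    stepA N st c = (st.items.flatMap (pairsOf N c)).foldl minsert PySem.Dict.empty := by
  rw [← foldl_bodyA]
  rfl

lemma get?_stepA (N c : Int) (st : PySem.Dict (Int × Int) Int) (q : Int × Int) :
    (stepA N st c).get? q = mfilG (st.items.flatMap (pairsOf N c)) q := by
  rw [stepA_eq, get?_foldl_minsert, PySem.Dict.get?_empty]
  rfl

lemma min?_eq_of_dom (xs ys : List Int)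
    (h1 : ∀ u ∈ xs, ∃ w ∈ ys, w ≤ u) (h2 : ∀ w ∈ ys, ∃ u ∈ xs, u ≤ w) :
    PySem.List.min? xs (fun x => x) = PySem.List.min? ys (fun x => x) := by
  cases hx : PySem.List.min? xs (fun x => x) with
  | none =>
      cases hy : PySem.List.min? ys (fun x => x) with
      | none => rfl
      | some m =>
          have hm := PySem.List.min?_mem hy
          obtain ⟨u, hu, _⟩ := h2 m hm
          rw [PySem.List.min?_eq_none_iff] at hx
          simp [hx] at hu
  | some m1 =>
      cases hy : PySem.List.min? ys (fun x => x) with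
      | none =>
          have hm := PySem.List.min?_mem hx
          obtain ⟨w, hw, _⟩ := h1 m1 hm
          rw [PySem.List.min?_eq_none_iff] at hy
          simp [hy] at hw
      | some m2 =>
          have hmem1 := PySem.List.min?_mem hx
          have hmem2 := PySem.List.min?_mem hy
          obtain ⟨w, hw, hwle⟩ := h1 m1 hmem1
          obtain ⟨u, hu, hule⟩ := h2 m2 hmem2
          have l1 := PySem.List.min?_isMin hx u hu
          have l2 := PySem.List.min?_isMin hy w hw
          simp only at l1 l2
          have : m1 = m2 := le_antisymm (le_trans l1 hule) (le_trans l2 hwle)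
          rw [this]

lemma mfilG_eq_some {κ : Type} [BEq κ] [LawfulBEq κ] {P : List (κ × Int)} {q : κ} {m : Int}
    (h : mfilG P q = some m) : ∃ kv ∈ P, kv.1 = q ∧ kv.2 = m := by
  have := PySem.List.min?_mem h
  simp only [List.mem_map, List.mem_filter, beq_iff_eq] at this
  obtain ⟨kv, ⟨hmem, hq⟩, hsnd⟩ := this
  exact ⟨kv, hmem, hq, hsnd⟩

lemma mfilG_le {κ : Type} [BEq κ] [LawfulBEq κ] {P : List (κ × Int)} {q : κ} {kv : κ × Int}
    (hm : kv ∈ P) (hq : kv.1 = q) : ∃ m, mfilG P q = some m ∧ m ≤ kv.2 := by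
  have hmem : kv.2 ∈ (P.filter (fun kv => kv.1 == q)).map Prod.snd := by
    simp only [List.mem_map, List.mem_filter, beq_iff_eq]
    exact ⟨kv, ⟨hm, hq⟩, rfl⟩
  cases hx : mfilG P q with
  | none =>
      rw [mfilG, PySem.List.min?_eq_none_iff] at hx
      simp [hx] at hmem
  | some m =>
      have := PySem.List.min?_isMin hx kv.2 hmem
      exact ⟨m, rfl, this⟩

lemma mem_zip_of_mem_right {pos dp : List Int} (hlen : pos.length = dp.length) {v : Int}
    (h : v ∈ dp) : ∃ x, (x, v) ∈ pos.zip dp := by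
  induction pos generalizing dp with
  | nil => cases dp <;> simp_all
  | cons p t ih =>
      cases dp with
      | nil => simp at h
      | cons d dt =>
          simp only [List.length_cons, Nat.add_right_cancel_iff] at hlen
          rcases List.mem_cons.mp h with h | h
          · exact ⟨p, by simp [h]⟩
          · obtain ⟨x, hx⟩ := ih hlen h
            exact ⟨x, by simp [hx]⟩

lemma bestOf_spec (N c : Int) {pos dp : List Int} (hlen : pos.length = dp.length)
    (hne : pos ≠ []) :
    (∃ pd ∈ pos.zip dp, bestOf N pos dp c = pd.2 + distB N pd.1 c) ∧
    (∀ pd ∈ pos.zip dp, bestOf N pos dp c ≤ pd.2 + distB N pd.1 c) := by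
  have hzne : pos.zip dp ≠ [] := by
    cases pos with
    | nil => exact absurd rfl hne
    | cons p t =>
        cases dp with
        | nil => simp at hlen
        | cons d dt => simp
  cases hx : PySem.List.min? ((pos.zip dp).map (fun pd => pd.2 + distB N pd.1 c)) (fun x => x) with
  | none =>
      rw [PySem.List.min?_eq_none_iff, List.map_eq_nil_iff] at hx
      exact absurd hx hzne
  | some m =>
      have hmem := PySem.List.min?_mem hx
      simp only [List.mem_map] at hmem
      obtain ⟨pd, hpd, hm⟩ := hmem
      constructor
      · exact ⟨pd, hpd, by simp [bestOf, hx, hm.symm]⟩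
      · intro pd' hpd'
        have hmm : pd'.2 + distB N pd'.1 c ∈ (pos.zip dp).map (fun pd => pd.2 + distB N pd.1 c) :=
          List.mem_map.mpr ⟨pd', hpd', rfl⟩
        have := PySem.List.min?_isMin hx _ hmm
        simpa [bestOf, hx] using this

lemma mem_contrib (N c a b u : Int) (st : PySem.Dict (Int × Int) Int) :
    (u ∈ ((st.items.flatMap (pairsOf N c)).filter (fun kv => kv.1 == (a, b))).map Prod.snd)
    ↔ ∃ it ∈ st.items,
        ((c = a ∧ it.1.2 = b ∧ u = it.2 + distB N c it.1.1) ∨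
         (it.1.1 = a ∧ c = b ∧ u = it.2 + distB N c it.1.2)) := by
  simp only [List.mem_map, List.mem_filter, List.mem_flatMap, pairsOf, List.mem_cons,
    beq_iff_eq, List.not_mem_nil, or_false]
  constructor
  · rintro ⟨kv, ⟨⟨it, hit, h⟩, hk⟩, hu⟩
    rcases h with h | h <;> subst h <;> refine ⟨it, hit, ?_⟩
    · rcases Prod.mk.injEq .. ▸ hk with ⟨h1, h2⟩
      exact Or.inl ⟨h1, h2, hu.symm⟩
    · rcases Prod.mk.injEq .. ▸ hk with ⟨h1, h2⟩
      exact Or.inr ⟨h1, h2, hu.symm⟩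
  · rintro ⟨it, hit, h | h⟩
    · obtain ⟨h1, h2, h3⟩ := h
      exact ⟨((c, it.1.2), it.2 + distB N c it.1.1), ⟨⟨it, hit, Or.inl rfl⟩, by rw [h1, h2]⟩, h3.symm⟩
    · obtain ⟨h1, h2, h3⟩ := h
      exact ⟨((it.1.1, c), it.2 + distB N c it.1.2), ⟨⟨it, hit, Or.inr rfl⟩, by rw [h1, h2]⟩, h3.symm⟩

lemma mem_newT (pos dp : List Int) (prev best D y w : Int) (hlen : pos.length = dp.length) :
    (w ∈ (((pos ++ [prev]).zip (dp.map (fun d => d + D) ++ [best])).filter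
        (fun kv => kv.1 == y)).map Prod.snd)
    ↔ ((∃ pd ∈ pos.zip dp, pd.1 = y ∧ w = pd.2 + D) ∨ (prev = y ∧ w = best)) := by
  rw [List.zip_append (by simp [hlen]), List.zip_map_right]
  simp only [List.filter_append, List.map_append, List.mem_append, List.mem_map,
    List.mem_filter, beq_iff_eq, List.zip_cons_cons, List.zip_nil_right]
  constructor
  · rintro (⟨kv, ⟨⟨pd, hpd, rfl⟩, hk⟩, hw⟩ | ⟨kv, ⟨hkv, hk⟩, hw⟩)
    · simp only [Prod.map_fst, Prod.map_snd, id] at hk hw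
      exact Or.inl ⟨pd, hpd, hk, hw.symm⟩
    · simp only [List.mem_singleton] at hkv
      subst hkv
      exact Or.inr ⟨hk, hw.symm⟩
  · rintro (⟨pd, hpd, hk, hw⟩ | ⟨hp, hw⟩)
    · exact Or.inl ⟨Prod.map id (fun d => d + D) pd, ⟨⟨pd, hpd, rfl⟩, by simpa using hk⟩, by simp [hw]⟩
    · exact Or.inr ⟨(prev, best), ⟨by simp, hp⟩, hw.symm⟩

lemma step_inv (N c : Int) {st : PySem.Dict (Int × Int) Int} {pos dp : List Int} {prev : Int}
    (h : InvAB st pos dp prev) :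
    InvAB (stepA N st c) (pos ++ [prev])
      (dp.map (fun d => d + distB N prev c) ++ [bestOf N pos dp c]) c := by
  obtain ⟨hlen, hne, hnd, hget⟩ := h
  have hitem : ∀ (l r v : Int), ((l, r), v) ∈ st.items → st.get? (l, r) = some v :=
    fun l r v hm => PySem.Dict.get?_of_mem_items st hm hnd
  have hitem' : ∀ (l r v : Int), st.get? (l, r) = some v → ((l, r), v) ∈ st.items :=
    fun l r v hm => PySem.Dict.mem_items_of_get?_eq_some st hm
  have hprev : ∀ y, st.get? (prev, y) = mfilG (pos.zip dp) y := fun y => by rw [hget]; simp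
  have hprev' : ∀ y, st.get? (y, prev) = mfilG (pos.zip dp) y := fun y => by
    rw [hget]
    by_cases hy : y = prev
    · rw [if_pos hy, hy]
    · rw [if_neg hy, if_pos rfl]
  have hbest := bestOf_spec N c hlen hne
  refine ⟨by simp [hlen], by simp, ?_, ?_⟩
  · rw [stepA_eq]
    exact nodup_keys_foldl_minsert _ _ (by simp [PySem.Dict.keys_empty])
  · intro a b
    rw [get?_stepA]
    by_cases hac : a = c
    · rw [if_pos hac]
      unfold mfilG
      apply min?_eq_of_dom
      · intro u hu
        obtain ⟨⟨⟨l, r⟩, v⟩, hit, hcase⟩ := (mem_contrib N c a b u st).mp hu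
        simp only at hcase
        have hg := hitem l r v hit
        rw [hget] at hg
        rcases hcase with ⟨-, hr, hu'⟩ | ⟨hl, hcb, hu'⟩
        · by_cases hl : l = prev
          · rw [if_pos hl] at hg
            obtain ⟨pd, hpd, hpd1, hpd2⟩ := mfilG_eq_some hg
            refine ⟨pd.2 + distB N prev c,
              (mem_newT pos dp prev (bestOf N pos dp c) (distB N prev c) b _ hlen).mpr
                (Or.inl ⟨pd, hpd, hpd1.trans hr, rfl⟩), ?_⟩
            rw [hu', hpd2, hl, distB_comm N prev c]
          · rw [if_neg hl] at hg
            by_cases hb : r = prev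
            · rw [if_pos hb] at hg
              obtain ⟨pd, hpd, hpd1, hpd2⟩ := mfilG_eq_some hg
              refine ⟨bestOf N pos dp c,
                (mem_newT pos dp prev (bestOf N pos dp c) (distB N prev c) b _ hlen).mpr
                  (Or.inr ⟨hb.symm.trans hr, rfl⟩), ?_⟩
              have hle := hbest.2 pd hpd
              rw [hpd1, hpd2] at hle
              rw [hu', distB_comm N c l]
              exact hle
            · rw [if_neg hb] at hg
              exact absurd hg (by simp)
        · by_cases hlp : l = prev
          · rw [if_pos hlp] at hg
            obtain ⟨pd, hpd, hpd1, hpd2⟩ := mfilG_eq_some hg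
            refine ⟨bestOf N pos dp c,
              (mem_newT pos dp prev (bestOf N pos dp c) (distB N prev c) b _ hlen).mpr
                (Or.inr ⟨((hlp.symm.trans hl).trans hac).trans hcb, rfl⟩), ?_⟩
            have hle := hbest.2 pd hpd
            rw [hpd1, hpd2] at hle
            rw [hu', distB_comm N c r]
            exact hle
          · rw [if_neg hlp] at hg
            by_cases hr : r = prev
            · rw [if_pos hr] at hg
              obtain ⟨pd, hpd, hpd1, hpd2⟩ := mfilG_eq_some hg
              refine ⟨pd.2 + distB N prev c,
                (mem_newT pos dp prev (bestOf N pos dp c) (distB N prev c) b _ hlen).mpr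
                  (Or.inl ⟨pd, hpd, hpd1.trans (hl.trans (hac.trans hcb)), rfl⟩), ?_⟩
              rw [hu', hpd2, hr, distB_comm N prev c]
            · rw [if_neg hr] at hg
              exact absurd hg (by simp)
      · intro w hw
        rcases (mem_newT pos dp prev (bestOf N pos dp c) (distB N prev c) b _ hlen).mp hw with
          ⟨pd, hpd, hpd1, hw'⟩ | ⟨hpb, hw'⟩
        · obtain ⟨m, hms, hmle⟩ := mfilG_le hpd rfl
          have hg : st.get? (prev, pd.1) = some m := by rw [hprev]; exact hms
          refine ⟨m + distB N c prev, (mem_contrib N c a b _ st).mpr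
            ⟨((prev, pd.1), m), hitem' prev pd.1 m hg, Or.inl ⟨hac.symm, hpd1, rfl⟩⟩, ?_⟩
          rw [hw', distB_comm N c prev]
          exact add_le_add hmle le_rfl
        · obtain ⟨pd, hpd, hbeq⟩ := hbest.1
          obtain ⟨m, hms, hmle⟩ := mfilG_le hpd rfl
          have hg : st.get? (pd.1, prev) = some m := by rw [hprev']; exact hms
          refine ⟨m + distB N c pd.1, (mem_contrib N c a b _ st).mpr
            ⟨((pd.1, prev), m), hitem' pd.1 prev m hg, Or.inl ⟨hac.symm, hpb, rfl⟩⟩, ?_⟩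
          rw [hw', hbeq, distB_comm N c pd.1]
          exact add_le_add hmle le_rfl
    · rw [if_neg hac]
      by_cases hbc : b = c
      · rw [if_pos hbc]
        unfold mfilG
        apply min?_eq_of_dom
        · intro u hu
          obtain ⟨⟨⟨l, r⟩, v⟩, hit, hcase⟩ := (mem_contrib N c a b u st).mp hu
          simp only at hcase
          have hg := hitem l r v hit
          rw [hget] at hg
          rcases hcase with ⟨hca, -, -⟩ | ⟨hl, -, hu'⟩
          · exact absurd hca.symm hac
          · by_cases hlp : l = prev
            · rw [if_pos hlp] at hg
              obtain ⟨pd, hpd, hpd1, hpd2⟩ := mfilG_eq_some hg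
              refine ⟨bestOf N pos dp c,
                (mem_newT pos dp prev (bestOf N pos dp c) (distB N prev c) a _ hlen).mpr
                  (Or.inr ⟨hlp.symm.trans hl, rfl⟩), ?_⟩
              have hle := hbest.2 pd hpd
              rw [hpd1, hpd2] at hle
              rw [hu', distB_comm N c r]
              exact hle
            · rw [if_neg hlp] at hg
              by_cases hr : r = prev
              · rw [if_pos hr] at hg
                obtain ⟨pd, hpd, hpd1, hpd2⟩ := mfilG_eq_some hg
                refine ⟨pd.2 + distB N prev c,
                  (mem_newT pos dp prev (bestOf N pos dp c) (distB N prev c) a _ hlen).mpr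
                    (Or.inl ⟨pd, hpd, hpd1.trans hl, rfl⟩), ?_⟩
                rw [hu', hpd2, hr, distB_comm N prev c]
              · rw [if_neg hr] at hg
                exact absurd hg (by simp)
        · intro w hw
          rcases (mem_newT pos dp prev (bestOf N pos dp c) (distB N prev c) a _ hlen).mp hw with
            ⟨pd, hpd, hpd1, hw'⟩ | ⟨hpa, hw'⟩
          · obtain ⟨m, hms, hmle⟩ := mfilG_le hpd rfl
            have hg : st.get? (pd.1, prev) = some m := by rw [hprev']; exact hms
            refine ⟨m + distB N c prev, (mem_contrib N c a b _ st).mpr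
              ⟨((pd.1, prev), m), hitem' pd.1 prev m hg, Or.inr ⟨hpd1, hbc.symm, rfl⟩⟩, ?_⟩
            rw [hw', distB_comm N c prev]
            exact add_le_add hmle le_rfl
          · obtain ⟨pd, hpd, hbeq⟩ := hbest.1
            obtain ⟨m, hms, hmle⟩ := mfilG_le hpd rfl
            have hg : st.get? (prev, pd.1) = some m := by rw [hprev]; exact hms
            refine ⟨m + distB N c pd.1, (mem_contrib N c a b _ st).mpr
              ⟨((prev, pd.1), m), hitem' prev pd.1 m hg, Or.inr ⟨hpa, hbc.symm, rfl⟩⟩, ?_⟩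
            rw [hw', hbeq, distB_comm N c pd.1]
            exact add_le_add hmle le_rfl
      · rw [if_neg hbc]
        unfold mfilG
        rw [PySem.List.min?_eq_none_iff, List.eq_nil_iff_forall_not_mem]
        intro u hu
        obtain ⟨⟨⟨l, r⟩, v⟩, hit, hcase⟩ := (mem_contrib N c a b u st).mp hu
        simp only at hcase
        rcases hcase with ⟨hca, -, -⟩ | ⟨-, hcb, -⟩
        · exact hac hca.symm
        · exact hbc hcb.symm

lemma stepB_def (N c : Int) (pos dp : List Int) (prev : Int) :
    stepB N (pos, dp, prev) c =
      (pos ++ [prev], dp.map (fun d => d + distB N prev c) ++ [bestOf N pos dp c], c) := rfl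

lemma fold_inv (N : Int) (rest : List Int) :
    ∀ (st : PySem.Dict (Int × Int) Int) (pos dp : List Int) (prev : Int), InvAB st pos dp prev →
      InvAB (rest.foldl (stepA N) st) (rest.foldl (stepB N) (pos, dp, prev)).1
        (rest.foldl (stepB N) (pos, dp, prev)).2.1 (rest.foldl (stepB N) (pos, dp, prev)).2.2 := by
  induction rest with
  | nil => intro st pos dp prev h; exact h
  | cons c t ih =>
      intro st pos dp prev h
      rw [List.foldl_cons, List.foldl_cons, stepB_def]
      exact ih _ _ _ _ (step_inv N c h)

set_option maxRecDepth 4000 in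
lemma base_inv (N c0 : Int) :
    InvAB (stepA N ((PySem.Dict.empty).insert (1, 1) 0) c0) [1] [distB N 1 c0] c0 := by
  refine ⟨rfl, by simp, ?_, ?_⟩
  · rw [stepA_eq]
    exact nodup_keys_foldl_minsert _ _ (by simp [PySem.Dict.keys_empty])
  · intro a b
    rw [get?_stepA]
    have hd : ((PySem.Dict.empty).insert ((1 : Int), (1 : Int)) (0 : Int)).items
        = [((1, 1), 0)] := rfl
    rw [hd]
    simp only [List.flatMap_cons, List.flatMap_nil, List.append_nil, pairsOf]
    rw [mfilG_cons, mfilG_cons, mfilG_nil, omin_none_right]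
    have hz : ([(1 : Int)].zip [distB N 1 c0]) = [(1, distB N 1 c0)] := rfl
    rw [hz]
    have he : (0 : Int) + distB N c0 1 = distB N 1 c0 := by rw [zero_add, distB_comm]
    have hm : ∀ y, mfilG [((1 : Int), distB N 1 c0)] y
        = if (1 : Int) = y then some (distB N 1 c0) else none := by
      intro y
      rw [mfilG_cons, mfilG_nil, omin_none_right]
      by_cases h : (1 : Int) = y
      · simp [h]
      · simp [h]
    rw [he]
    by_cases h1 : (c0, (1 : Int)) = (a, b) <;> by_cases h2 : ((1 : Int), c0) = (a, b)
    · obtain ⟨hca, h1b⟩ := Prod.ext_iff.mp h1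
      obtain ⟨h1a, hcb⟩ := Prod.ext_iff.mp h2
      rw [if_pos (beq_iff_eq.mpr h1), if_pos (beq_iff_eq.mpr h2), if_pos hca.symm, hm b,
        if_pos h1b]
      simp [omin]
    · obtain ⟨hca, h1b⟩ := Prod.ext_iff.mp h1
      rw [if_pos (beq_iff_eq.mpr h1), if_neg (by simp [h2]), if_pos hca.symm, hm b, if_pos h1b]
      simp [omin]
    · obtain ⟨h1a, hcb⟩ := Prod.ext_iff.mp h2
      rw [if_neg (by simp [h1]), if_pos (beq_iff_eq.mpr h2)]
      by_cases hac : a = c0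
      · rw [if_pos hac, hm b, if_pos (h1a.trans (hac.trans hcb))]
        simp [omin]
      · rw [if_neg hac, if_pos hcb.symm, hm a, if_pos h1a]
        simp [omin]
    · rw [if_neg (by simp [h1]), if_neg (by simp [h2])]
      by_cases hac : a = c0
      · rw [if_pos hac, hm b, if_neg (fun hb => h1 (Prod.ext_iff.mpr ⟨hac.symm, hb⟩))]
        rfl
      · rw [if_neg hac]
        by_cases hbc : b = c0
        · rw [if_pos hbc, hm a, if_neg (fun ha => h2 (Prod.ext_iff.mpr ⟨ha, hbc.symm⟩))]
          rfl
        · rw [if_neg hbc]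
          rfl

lemma final_eq {st : PySem.Dict (Int × Int) Int} {pos dp : List Int} {prev : Int}
    (h : InvAB st pos dp prev) :
    PySem.List.min? st.values (fun x => x) = PySem.List.min? dp (fun x => x) := by
  obtain ⟨hlen, hne, hnd, hget⟩ := h
  apply min?_eq_of_dom
  · intro u hu
    simp only [PySem.Dict.values, List.mem_map] at hu
    obtain ⟨⟨⟨l, r⟩, v⟩, hkv, hv⟩ := hu
    have hg := PySem.Dict.get?_of_mem_items st hkv hnd
    rw [hget] at hg
    by_cases hl : l = prev
    · rw [if_pos hl] at hg
      obtain ⟨pd, hpd, _, hpd2⟩ := mfilG_eq_some hg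
      refine ⟨pd.2, ?_, by rw [hpd2]; exact le_of_eq hv⟩
      have := List.of_mem_zip (show (pd.1, pd.2) ∈ pos.zip dp from hpd)
      exact this.2
    · rw [if_neg hl] at hg
      by_cases hr : r = prev
      · rw [if_pos hr] at hg
        obtain ⟨pd, hpd, _, hpd2⟩ := mfilG_eq_some hg
        refine ⟨pd.2, ?_, by rw [hpd2]; exact le_of_eq hv⟩
        have := List.of_mem_zip (show (pd.1, pd.2) ∈ pos.zip dp from hpd)
        exact this.2
      · rw [if_neg hr] at hg
        exact absurd hg (by simp)
  · intro w hw
    obtain ⟨x, hx⟩ := mem_zip_of_mem_right hlen hw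
    obtain ⟨m, hms, hmle⟩ := mfilG_le hx rfl
    have hg : st.get? (prev, x) = some m := by rw [hget, if_pos rfl]; exact hms
    have hmem := PySem.Dict.mem_items_of_get?_eq_some st hg
    refine ⟨m, ?_, hmle⟩
    simp only [PySem.Dict.values, List.mem_map]
    exact ⟨((prev, x), m), hmem, rfl⟩

-- ===== VERDICT (by name: the statement is the Claim_ definition above) =====
theorem get_min_code_entry_time_ii_spec : Claim_equal_get_min_code_entry_time_ii := by
  intro N M C _
  unfold Spec_get_min_code_entry_time_ii
  cases C with
  | nil => rfl
  | cons c0 rest =>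
      have hbase := base_inv N c0
      have hinv := fold_inv N rest _ _ _ _ hbase
      have := final_eq hinv
      simp only [get_min_code_entry_time_ii, get_min_code_entry_time_ii_alt, List.foldl_cons]
      rw [this]
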